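-- pv_equiv track=rewrite | github.com/KelseyKwon/backjoon-programmers | 프로그래머스/2/131127. 할인 행사/할인 행사.py | solution
-- ===== SOURCE A (Python) =====
-- from collections import Counter
--
-- def solution(want, number, discount):
--     need = dict(zip(want, number))
--     n = len(discount)
--
--     # number의 합이 10이니까 discount의 원소의 길이 10이 안되면 조건 미충족
--     if n < 10:
--         return 0
--
--     #초기 10일 빈도
--     window_cnt = Counter(discount[:10])
--
--     def ok():
--         return all(window_cnt.get(item, 0) >= need[item] for item in need)
--
--     answer = 1 if ok() else 0
--
--     for i in range(10, n):
--         out_item = discount[i-10]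
--         in_item = discount[i]
--
--         # 윈도우에서 빠지는 항목
--         window_cnt[out_item] -= 1
--         if window_cnt[out_item] == 0:
--             del window_cnt[out_item]
--
--         #윈도우에 새로 들어오는 항목
--         window_cnt[in_item] += 1
--
--         if ok():
--             answer += 1
--
--     return answer
-- ===== SOURCE B (Python) =====
-- def solution(want, number, discount):
--     need = dict(zip(want, number))
--     return sum(
--         1
--         for j in range(len(discount) - 9)
--         if all(discount[j:j+10].count(k) >= v for k, v in need.items())
--     )
-- ===== Notes on version B (the rewrite author's own statement) =====
-- stated objective: simpler
-- what changed: Replaces the mutable sliding Counter (decrement/delete/increment plus an all-keys check per step) with a direct one-liner that counts, for every window start j, each wanted item in the 10-day slice discount[j:j+10].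
import Mathlib
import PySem

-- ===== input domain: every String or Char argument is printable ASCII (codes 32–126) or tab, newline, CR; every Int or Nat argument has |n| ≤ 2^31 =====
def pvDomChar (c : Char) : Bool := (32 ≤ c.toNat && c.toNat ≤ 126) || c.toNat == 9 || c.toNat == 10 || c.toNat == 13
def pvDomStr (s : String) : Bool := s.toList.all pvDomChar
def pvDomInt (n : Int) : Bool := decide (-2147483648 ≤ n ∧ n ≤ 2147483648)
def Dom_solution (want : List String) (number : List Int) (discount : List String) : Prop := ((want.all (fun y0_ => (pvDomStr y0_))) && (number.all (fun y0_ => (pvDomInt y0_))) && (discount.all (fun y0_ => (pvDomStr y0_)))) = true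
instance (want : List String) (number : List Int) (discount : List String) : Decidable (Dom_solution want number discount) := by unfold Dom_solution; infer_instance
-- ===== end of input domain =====

-- B re-implements the window count by direct per-window counting over slices (simpler, no mutable
-- sliding counter); equivalence of the return values is proved below. Neither program mutates its arguments.

-- ===== PORT A =====
-- Python's nested `ok()` : all(window_cnt.get(item, 0) >= need[item] for item in need)
-- (need[item] is read with getD 0; the key is in need, so the default is never used)
def okA (need w : PySem.Dict String Int) : Bool :=
  need.keys.all (fun item => decide (w.getD item 0 ≥ need.getD item 0))

-- one iteration of A's `for i in range(10, n)` body; state = (window_cnt, answer)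
def stepA (need : PySem.Dict String Int) (discount : List String)
    (st : PySem.Dict String Int × Int) (i : Int) : PySem.Dict String Int × Int :=
  let outItem := PySem.List.pyGetD discount (i - 10) ""
  let inItem := PySem.List.pyGetD discount i ""
  let w1 := st.1.modify outItem 0 (· - 1)                                   -- window_cnt[out_item] -= 1
  let w2 := if w1.getD outItem 0 == 0 then w1.erase outItem else w1          -- if == 0: del
  let w3 := w2.modify inItem 0 (· + 1)                                       -- window_cnt[in_item] += 1
  (w3, if okA need w3 then st.2 + 1 else st.2)

def solution (want : List String) (number : List Int) (discount : List String) : Int :=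
  let need : PySem.Dict String Int := PySem.Dict.ofList (want.zip number)
  let n : Int := discount.length
  if n < 10 then 0
  else
    let windowCnt := PySem.Dict.counter (PySem.List.slice discount none (some 10))
    let answer : Int := if okA need windowCnt then 1 else 0
    ((PySem.List.pyRange 10 n 1).foldl (stepA need discount) (windowCnt, answer)).2

-- ===== PORT B =====
def solution_alt (want : List String) (number : List Int) (discount : List String) : Int :=
  let need : PySem.Dict String Int := PySem.Dict.ofList (want.zip number)
  (PySem.List.pyRange 0 ((discount.length : Int) - 9) 1).foldl
    (fun acc j =>
      if need.items.all (fun kv =>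
          decide (((PySem.List.slice discount (some j) (some (j + 10))).count kv.1 : Int) ≥ kv.2))
      then acc + 1 else acc) 0

-- ===== PRECONDITION & SPEC =====
def Spec_solution (want : List String) (number : List Int) (discount : List String) (out : Int) : Prop := out = solution_alt want number discount
instance (want : List String) (number : List Int) (discount : List String) (out : Int) : Decidable (Spec_solution want number discount out) := by unfold Spec_solution; infer_instance

-- ===== CLAIM (what is proved, stated in full; the proofs are below) =====
def Claim_equal_solution : Prop := ∀ (want : List String) (number : List Int) (discount : List String), Dom_solution want number discount → Spec_solution want number discount (solution want number discount)

-- ===== LEMMAS AND PROOFS =====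

-- the window-start-j predicate both programs decide
def good (need : PySem.Dict String Int) (ds : List String) (j : Nat) : Bool :=
  need.keys.all (fun k => decide ((((ds.drop j).take 10).count k : Int) ≥ need.getD k 0))

lemma find?_filter_erase {ν : Type} (l : List (String × ν)) (k k' : String) :
    List.find? (fun p => p.1 == k') (List.filter (fun p => !p.1 == k) l)
      = if k' = k then none else List.find? (fun p => p.1 == k') l := by
  induction l with
  | nil => simp
  | cons p rest ih =>
    rw [List.filter_cons]
    by_cases hpk : p.1 = k
    · rw [if_neg (by simp [hpk]), ih]
      by_cases hk' : k' = k
      · simp [hk']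
      · rw [if_neg hk', if_neg hk',
          List.find?_cons_of_neg (by simp; exact fun h => hk' ((h ▸ hpk : k' = k)))]
    · rw [if_pos (by simp [hpk])]
      by_cases hpk' : p.1 = k'
      · have hkk : ¬ k' = k := fun h => hpk (hpk'.trans h)
        rw [List.find?_cons_of_pos (by simp [hpk']),
          List.find?_cons_of_pos (by simp [hpk']), if_neg hkk]
      · rw [List.find?_cons_of_neg (by simp [hpk']),
          List.find?_cons_of_neg (by simp [hpk']), ih]

lemma get?_erase {ν : Type} (d : PySem.Dict String ν) (k k' : String) :
    (d.erase k).get? k' = if k' = k then none else d.get? k' := by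
  obtain ⟨l⟩ := d
  simp only [PySem.Dict.erase, PySem.Dict.get?, find?_filter_erase]
  split <;> rfl

lemma getD_erase {ν : Type} (d : PySem.Dict String ν) (k k' : String) (v : ν) :
    (d.erase k).getD k' v = if k' = k then v else d.getD k' v := by
  simp only [PySem.Dict.getD, get?_erase]
  split <;> rfl

-- Counter's "decrement, and delete the key if it hit 0" never changes any getD-with-0 lookup
lemma getD_eraseZero (d : PySem.Dict String Int) (out k : String) :
    (if d.getD out 0 == 0 then d.erase out else d).getD k 0 = d.getD k 0 := by
  split
  next h =>
    rw [getD_erase]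
    split
    next hk => rw [hk]; exact (beq_iff_eq.mp h).symm
    next => rfl
  next => rfl

lemma okA_eq_good (need : PySem.Dict String Int) (ds : List String) (j : Nat)
    (w : PySem.Dict String Int) (hw : ∀ k, w.getD k 0 = (((ds.drop j).take 10).count k : Int)) :
    okA need w = good need ds j := by
  simp only [okA, good, hw]

-- getD after Counter's decrement / delete-if-zero / increment pipeline
lemma counterStep_getD (w : PySem.Dict String Int) (out inn k : String) :
    (((if (w.modify out 0 (· - 1)).getD out 0 == 0
        then (w.modify out 0 (· - 1)).erase out
        else (w.modify out 0 (· - 1))).modify inn 0 (· + 1))).getD k 0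
      = w.getD k 0 - (if k = out then 1 else 0) + (if k = inn then 1 else 0) := by
  rw [PySem.Dict.getD_modify]
  by_cases h1 : k = inn
  · rw [if_pos h1, getD_eraseZero, PySem.Dict.getD_modify]
    by_cases h2 : k = out
    · rw [if_pos ((h1.symm.trans h2 : inn = out)), if_pos h2, if_pos h1, h2]
    · rw [if_neg (fun h => h2 (h1.trans h)), if_neg h2, if_pos h1, ← h1]; ring
  · rw [if_neg h1, getD_eraseZero, PySem.Dict.getD_modify]
    by_cases h2 : k = out
    · rw [if_pos h2, if_neg h1, if_pos h2, ← h2]; ring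
    · rw [if_neg h2, if_neg h1, if_neg h2]; ring

-- getD after one body of A's loop
lemma stepA_getD (need : PySem.Dict String Int) (ds : List String)
    (w : PySem.Dict String Int) (a : Int) (t : Nat) (ht : 10 + t < ds.length) (k : String) :
    ((stepA need ds (w, a) ((10 : Int) + t)).1).getD k 0
      = w.getD k 0 - (if k = ds[t] then 1 else 0) + (if k = ds[10 + t] then 1 else 0) := by
  have ht' : t < ds.length := by omega
  have g1 : PySem.List.pyGetD ds (((10 : Int) + t) - 10) "" = ds[t] := by
    rw [show ((10 : Int) + t) - 10 = ((t : Nat) : Int) by ring, PySem.List.pyGetD_natCast,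
      List.getD_eq_getElem _ _ ht']
  have g2 : PySem.List.pyGetD ds ((10 : Int) + t) "" = ds[10 + t] := by
    rw [show ((10 : Int) + (t : Int)) = (((10 + t : Nat)) : Int) by push_cast; ring,
      PySem.List.pyGetD_natCast, List.getD_eq_getElem _ _ ht]
  simp only [stepA]
  rw [g1, g2]
  exact counterStep_getD w ds[t] ds[10 + t] k

-- shifting the 10-day window by one
lemma window_shift (ds : List String) (t : Nat) (ht : 10 + t < ds.length) (k : String) :
    (((ds.drop (t + 1)).take 10).count k : Int)
      = (((ds.drop t).take 10).count k : Int)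
        - (if k = ds[t] then 1 else 0) + (if k = ds[10 + t] then 1 else 0) := by
  have ht' : t < ds.length := by omega
  have h1 : ds.drop t = ds[t] :: ds.drop (t + 1) := List.drop_eq_getElem_cons ht'
  have h9 : (ds.drop (t + 1))[9]? = some ds[10 + t] := by
    rw [List.getElem?_drop, show t + 1 + 9 = 10 + t by omega, List.getElem?_eq_getElem ht]
  have h2 : (ds.drop (t + 1)).take 10 = (ds.drop (t + 1)).take 9 ++ [ds[10 + t]] := by
    conv_lhs => rw [show (10 : Nat) = 9 + 1 from rfl, List.take_succ]
    rw [h9]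
    rfl
  have h3 : (ds[t] :: ds.drop (t + 1)).take 10 = ds[t] :: (ds.drop (t + 1)).take 9 := by
    rw [show (10 : Nat) = 9 + 1 from rfl, List.take_succ_cons]
  rw [h1, h3, h2, List.count_cons, List.count_append, List.count_cons, List.count_nil]
  by_cases hout : k = ds[t]
  · have c1 : (ds[t] == k) = true := by simp [hout]
    by_cases hin : k = ds[10 + t]
    · have c2 : (ds[10 + t] == k) = true := by simp [hin]
      simp only [c1, c2, if_pos hout, if_pos hin, eq_self_iff_true, if_true]
      push_cast; omega
    · have c2 : (ds[10 + t] == k) = false := by simpa using fun h => hin h.symm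
      simp only [c1, c2, if_pos hout, if_neg hin, eq_self_iff_true, Bool.false_eq_true,
        if_true, if_false]
      push_cast; omega
  · have c1 : (ds[t] == k) = false := by simpa using fun h => hout h.symm
    by_cases hin : k = ds[10 + t]
    · have c2 : (ds[10 + t] == k) = true := by simp [hin]
      simp only [c1, c2, if_neg hout, if_pos hin, eq_self_iff_true, Bool.false_eq_true,
        if_true, if_false]
      push_cast; omega
    · have c2 : (ds[10 + t] == k) = false := by simpa using fun h => hin h.symm
      simp only [c1, c2, if_neg hout, if_neg hin, Bool.false_eq_true, if_false]
      push_cast; omega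

-- A's loop invariant, by induction on the number of processed days
lemma loopA (need : PySem.Dict String Int) (ds : List String)
    (w0 : PySem.Dict String Int) (a0 : Int)
    (hw0 : ∀ k, w0.getD k 0 = ((ds.take 10).count k : Int))
    (d : Nat) (hd : 10 + d ≤ ds.length) :
    (∀ k, ((PySem.List.pyRange 10 (10 + (d : Int)) 1).foldl (stepA need ds) (w0, a0)).1.getD k 0
        = (((ds.drop d).take 10).count k : Int))
    ∧ ((PySem.List.pyRange 10 (10 + (d : Int)) 1).foldl (stepA need ds) (w0, a0)).2
        = a0 + ((List.range d).countP (fun t => good need ds (t + 1)) : Int) := by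
  induction d with
  | zero =>
    have he : PySem.List.pyRange 10 (10 + ((0 : Nat) : Int)) 1 = [] := by decide
    simp [he, hw0]
  | succ d ih =>
    have hd' : 10 + d ≤ ds.length := by omega
    have ht : 10 + d < ds.length := by omega
    obtain ⟨ihw, iha⟩ := ih hd'
    have e : (10 : Int) + ((d + 1 : Nat) : Int) = (10 + ((d : Nat) : Int)) + 1 := by push_cast; ring
    rw [e, PySem.List.pyRange_one_succ_right (by omega), List.foldl_append]
    set r := (PySem.List.pyRange 10 (10 + (d : Int)) 1).foldl (stepA need ds) (w0, a0) with hr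
    have hstep : List.foldl (stepA need ds) r [10 + (d : Int)] = stepA need ds (r.1, r.2) (10 + (d : Int)) := by
      simp
    rw [hstep]
    have hgetD : ∀ k, (stepA need ds (r.1, r.2) ((10 : Int) + d)).1.getD k 0
        = (((ds.drop (d + 1)).take 10).count k : Int) := by
      intro k
      rw [stepA_getD need ds r.1 r.2 d ht k, ihw k, ← window_shift ds d ht k]
    refine ⟨hgetD, ?_⟩
    have hok : okA need (stepA need ds (r.1, r.2) ((10 : Int) + d)).1 = good need ds (d + 1) :=
      okA_eq_good need ds (d + 1) _ hgetD
    show (if okA need (stepA need ds (r.1, r.2) ((10 : Int) + d)).1 = true then r.2 + 1 else r.2) = _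
    rw [hok, iha, List.range_succ, List.countP_append, List.countP_cons]
    by_cases hg : good need ds (d + 1) = true <;> simp [hg] <;> push_cast <;> ring

-- both sides equal this closed per-window count
lemma solution_eq_count (want : List String) (number : List Int) (discount : List String) :
    solution want number discount
      = ((List.range (discount.length - 9)).countP
          (fun j => good (PySem.Dict.ofList (want.zip number)) discount j) : Int) := by
  simp only [solution]
  by_cases hlt : (discount.length : Int) < 10
  · have h0 : discount.length - 9 = 0 := by omega
    simp [hlt, h0]
  · have hn : 10 ≤ discount.length := by omega
    simp only [if_neg hlt]
    set need := PySem.Dict.ofList (want.zip number) with hneed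
    have hw0 : ∀ k, (PySem.Dict.counter (PySem.List.slice discount none (some 10))).getD k 0
        = ((discount.take 10).count k : Int) := by
      intro k
      rw [PySem.List.slice_to discount (by norm_num), PySem.Dict.getD_counter]
      simp
    have e : (discount.length : Int) = 10 + ((discount.length - 10 : Nat) : Int) := by push_cast; omega
    rw [e]
    obtain ⟨_, h2⟩ := loopA need discount _ _ hw0 (discount.length - 10) (by omega)
    rw [h2, okA_eq_good need discount 0 _ (by simpa using hw0)]
    have e9 : discount.length - 9 = (discount.length - 10) + 1 := by omega
    rw [e9, List.range_succ_eq_map, List.countP_cons, List.countP_map]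
    have : (fun t => good need discount (t + 1)) = ((fun j => good need discount j) ∘ Nat.succ) := rfl
    rw [this]
    by_cases hg : good need discount 0 = true <;> simp [hg] <;> push_cast <;> ring

lemma solution_alt_eq_count (want : List String) (number : List Int) (discount : List String) :
    solution_alt want number discount
      = ((List.range (discount.length - 9)).countP
          (fun j => good (PySem.Dict.ofList (want.zip number)) discount j) : Int) := by
  unfold solution_alt
  set need := PySem.Dict.ofList (want.zip number) with hneed
  have hrange : PySem.List.pyRange 0 ((discount.length : Int) - 9) 1
      = (List.range (discount.length - 9)).map (fun t : Nat => (t : Int)) := by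
    by_cases h9 : 9 ≤ discount.length
    · rw [show (discount.length : Int) - 9 = ((discount.length - 9 : Nat) : Int) by push_cast; omega]
      exact PySem.List.pyRange_zero_natCast _
    · have hneg : (discount.length : Int) - 9 ≤ 0 := by omega
      have h0 : discount.length - 9 = 0 := by omega
      rw [h0]
      simp only [List.range_zero, List.map_nil]
      simp [PySem.List.pyRange]
      omega
  rw [hrange, List.foldl_map, PySem.List.foldl_if_add_one
    (fun t : Nat => need.items.all (fun kv =>
      decide (((PySem.List.slice discount (some (t : Int)) (some ((t : Int) + 10))).count kv.1 : Int) ≥ kv.2)))]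
  rw [zero_add]
  congr 1
  apply List.countP_congr
  intro t _
  have hsl : PySem.List.slice discount (some (t : Int)) (some ((t : Int) + 10))
      = (discount.drop t).take 10 := by
    rw [PySem.List.slice_toNat discount (by positivity) (by positivity)]
    congr 1 <;> omega
  rw [hsl]
  -- items.all over (k, v) pairs = keys.all over getD (need has Nodup keys)
  rw [PySem.Dict.items_eq_map_keys need (PySem.Dict.nodup_keys_ofList _) 0, List.all_map]
  rfl

-- ===== VERDICT (by name: the statement is the Claim_ definition above) =====
theorem solution_spec : Claim_equal_solution := by
  intro want number discount _
  unfold Spec_solution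
  rw [solution_eq_count, solution_alt_eq_count]
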